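-- pv_equiv track=rewrite | github.com/eyalshimony/Joint-FWI | 2D/regularisation.py | filter_descending_part
-- ===== SOURCE A (Python) =====
-- def filter_descending_part(a):
--     filtered = [a[0]]
--     indices = [0]
--
--     for i in range(1, len(a)):
--         if a[i] <= filtered[-1]:
--             filtered.append(a[i])
--             indices.append(i)
--
--     return filtered, indices
-- ===== SOURCE B (Python) =====
-- def filter_descending_part(a):
--     # Table-then-filter: build the prefix-minimum table, then keep exactly the
--     # positions where the element equals its prefix minimum.
--     pm = []
--     m = a[0]
--     for x in a:
--         m = min(m, x)
--         pm.append(m)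
--     indices = [i for i, x in enumerate(a) if x == pm[i]]
--     filtered = [a[i] for i in indices]
--     return filtered, indices
-- ===== Notes on version B (the rewrite author's own statement) =====
-- stated objective: alternative
-- what changed: Replaces A's single stateful scan that reads the last kept element with a two-pass table-then-filter shape: build the prefix-minimum table, then keep exactly the positions whose element equals its prefix minimum.
import Mathlib
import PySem

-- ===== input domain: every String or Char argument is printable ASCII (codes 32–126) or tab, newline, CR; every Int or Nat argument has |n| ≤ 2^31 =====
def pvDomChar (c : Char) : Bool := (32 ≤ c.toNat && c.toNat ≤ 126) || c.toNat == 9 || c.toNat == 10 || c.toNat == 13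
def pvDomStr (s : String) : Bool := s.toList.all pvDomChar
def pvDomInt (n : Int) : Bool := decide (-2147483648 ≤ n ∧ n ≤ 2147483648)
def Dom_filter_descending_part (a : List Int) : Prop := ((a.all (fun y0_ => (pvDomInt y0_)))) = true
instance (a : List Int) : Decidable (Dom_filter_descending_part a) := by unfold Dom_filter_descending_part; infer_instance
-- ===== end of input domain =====

-- B replaces A's stateful scan (reading the last kept element) with a prefix-minimum table
-- plus a filter pass (objective: alternative decomposition, same cost).

-- ===== PORT A =====
-- a[0], a[i] and filtered[-1] are ported with pyGetD (default 0): under Pre_ (a ≠ [])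
-- every access is in range (filtered is never empty), so this is exact.
def filter_descending_part (a : List Int) : List Int × List Int :=
  let filtered : List Int := [PySem.List.pyGetD a 0 0]
  (PySem.List.pyRange 1 (PySem.List.len a) 1).foldl
    (fun (st : List Int × List Int) (i : Int) =>
      if PySem.List.pyGetD a i 0 ≤ PySem.List.pyGetD st.1 (-1) 0 then
        (st.1 ++ [PySem.List.pyGetD a i 0], st.2 ++ [i])
      else st)
    (filtered, [0])

-- ===== PORT B =====
def filter_descending_part_alt (a : List Int) : List Int × List Int :=
  let pm : List Int :=
    (a.foldl (fun (st : Int × List Int) (x : Int) =>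
        let m := min st.1 x
        (m, st.2 ++ [m]))
      (PySem.List.pyGetD a 0 0, [])).2
  let indices : List Int :=
    ((PySem.List.enumerate a 0).filter (fun p => p.2 == PySem.List.pyGetD pm p.1 0)).map (·.1)
  let filtered : List Int := indices.map (fun i => PySem.List.pyGetD a i 0)
  (filtered, indices)

-- ===== PRECONDITION & SPEC =====
-- A raises IndexError on the empty list (a[0]); B raises there too; excluded.
def Pre_filter_descending_part (a : List Int) : Prop := a ≠ []
instance (a : List Int) : Decidable (Pre_filter_descending_part a) := by
  unfold Pre_filter_descending_part; infer_instance
def pvWitness_filter_descending_part : List Int := [3, 1, 2]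
def Spec_filter_descending_part (a : List Int) (out : List Int × List Int) : Prop :=
  out = filter_descending_part_alt a
instance (a : List Int) (out : List Int × List Int) : Decidable (Spec_filter_descending_part a out) := by
  unfold Spec_filter_descending_part; infer_instance

-- ===== CLAIM (what is proved, stated in full; the proofs are below) =====
def Claim_equal_filter_descending_part : Prop :=
  ∀ (a : List Int), Dom_filter_descending_part a → Pre_filter_descending_part a →
    Spec_filter_descending_part a (filter_descending_part a)

-- ===== LEMMAS AND PROOFS =====

-- Canonical recursion both ports are reduced to: walking the tail with the running
-- minimum m and the next index i, returning the kept (values, indices).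
def pvGo (m i : Int) : List Int → List Int × List Int
  | [] => ([], [])
  | x :: xs =>
    if x ≤ m then
      let r := pvGo x (i + 1) xs
      (x :: r.1, i :: r.2)
    else pvGo m (i + 1) xs

-- the running prefix-minimum list with seed m
def pvPm (m : Int) : List Int → List Int
  | [] => []
  | x :: xs => min m x :: pvPm (min m x) xs

-- reading a[i] when the drop at i is known
theorem pvGetD_drop {a : List Int} {i : Int} {x : Int} {xs : List Int}
    (hi : 0 ≤ i) (hd : a.drop i.toNat = x :: xs) : PySem.List.pyGetD a i 0 = x := by
  have hlen : i.toNat < a.length := by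
    by_contra h
    simp [List.drop_eq_nil_of_le (Nat.le_of_not_lt h)] at hd
  rw [PySem.List.pyGetD_eq_getElem a 0 hi (by omega)]
  have h3 := List.getElem?_drop (xs := a) (i := i.toNat) (j := 0)
  rw [hd] at h3
  simp only [List.getElem?_cons_zero, Nat.add_zero] at h3
  have h4 : a[i.toNat]? = some a[i.toNat] := List.getElem?_eq_getElem hlen
  rw [← h3] at h4
  exact (Option.some.inj h4).symm

theorem pvDrop_succ {a : List Int} {i : Int} {x : Int} {xs : List Int}
    (hi : 0 ≤ i) (hd : a.drop i.toNat = x :: xs) : a.drop (i + 1).toNat = xs := by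
  have h1 : (i + 1).toNat = i.toNat + 1 := by omega
  rw [h1, ← List.drop_drop, hd]
  simp

theorem pvLast_append (f : List Int) (x : Int) :
    PySem.List.pyGetD (f ++ [x]) (-1) 0 = x := by
  simp [PySem.List.pyGetD, PySem.List.pyGet?_neg_one_append_singleton]

-- A's loop equals pvGo, by induction on the remaining suffix of a.
theorem pvLoopA (t : List Int) : ∀ (s : Int) (a f idx : List Int) (m : Int),
    0 ≤ s → a.drop s.toNat = t → PySem.List.pyGetD f (-1) 0 = m →
    (PySem.List.pyRange s (PySem.List.len a) 1).foldl
      (fun (st : List Int × List Int) (i : Int) =>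
        if PySem.List.pyGetD a i 0 ≤ PySem.List.pyGetD st.1 (-1) 0 then
          (st.1 ++ [PySem.List.pyGetD a i 0], st.2 ++ [i])
        else st)
      (f, idx)
    = (f ++ (pvGo m s t).1, idx ++ (pvGo m s t).2) := by
  induction t with
  | nil =>
    intro s a f idx m hs hd hm
    have hge : a.length ≤ s.toNat := by
      by_contra h
      rw [List.drop_eq_nil_iff] at hd
      omega
    rw [PySem.List.pyRange_one_eq_nil (by simp [PySem.List.len_eq]; omega)]
    simp [pvGo]
  | cons x xs ih =>
    intro s a f idx m hs hd hm
    have hlen : s.toNat < a.length := by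
      by_contra h
      simp [List.drop_eq_nil_of_le (Nat.le_of_not_lt h)] at hd
    rw [PySem.List.pyRange_one_cons (by simp [PySem.List.len_eq]; omega)]
    simp only [List.foldl_cons, pvGetD_drop hs hd, hm]
    by_cases hle : x ≤ m
    · rw [if_pos hle, ih (s + 1) a (f ++ [x]) (idx ++ [s]) x (by omega)
        (pvDrop_succ hs hd) (pvLast_append f x)]
      simp [pvGo, if_pos hle, List.append_assoc]
    · rw [if_neg hle, ih (s + 1) a f idx m (by omega) (pvDrop_succ hs hd) hm]
      simp [pvGo, if_neg hle]

-- B's prefix-minimum fold builds pvPm.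
theorem pvPmFold (l : List Int) : ∀ (m : Int) (acc : List Int),
    (l.foldl (fun (st : Int × List Int) (x : Int) =>
        let mm := min st.1 x
        (mm, st.2 ++ [mm]))
      (m, acc)).2 = acc ++ pvPm m l := by
  induction l with
  | nil => simp [pvPm]
  | cons x xs ih =>
    intro m acc
    simp only [List.foldl_cons, pvPm]
    rw [ih]
    simp

-- B's filter over the enumeration picks exactly pvGo's indices.
theorem pvLoopB (t : List Int) : ∀ (i m : Int) (full : List Int),
    0 ≤ i → full.drop i.toNat = pvPm m t →
    ((PySem.List.enumerate t i).filter
        (fun p => p.2 == PySem.List.pyGetD full p.1 0)).map (·.1)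
      = (pvGo m i t).2 := by
  induction t with
  | nil => intro i m full hi hd; simp [pvGo, PySem.List.enumerate]
  | cons x xs ih =>
    intro i m full hi hd
    rw [PySem.List.enumerate_cons]
    simp only [pvPm] at hd
    have hfull : PySem.List.pyGetD full i 0 = min m x := pvGetD_drop hi hd
    by_cases hle : x ≤ m
    · have hmin : min m x = x := min_eq_right hle
      rw [hmin] at hd
      simp only [List.filter_cons, hfull, hmin, beq_self_eq_true, if_pos, List.map_cons]
      rw [ih (i + 1) x full (by omega) (pvDrop_succ hi hd)]
      simp [pvGo, if_pos hle]
    · have hmin : min m x = m := min_eq_left (le_of_not_ge hle)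
      rw [hmin] at hd
      have hne : (x == PySem.List.pyGetD full i 0) = false := by
        rw [hfull, hmin]
        simp only [beq_eq_false_iff_ne, ne_eq]
        intro h; exact hle (le_of_eq h)
      simp only [List.filter_cons, hne, if_neg, Bool.false_eq_true, not_false_iff]
      rw [ih (i + 1) m full (by omega) (pvDrop_succ hi hd)]
      simp [pvGo, if_neg hle]

-- Rebuilding the kept values from the kept indices.
theorem pvMapIdx (t : List Int) : ∀ (i m : Int) (a : List Int),
    0 ≤ i → a.drop i.toNat = t →
    (pvGo m i t).2.map (fun j => PySem.List.pyGetD a j 0) = (pvGo m i t).1 := by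
  induction t with
  | nil => intro i m a hi hd; simp [pvGo]
  | cons x xs ih =>
    intro i m a hi hd
    have hx : PySem.List.pyGetD a i 0 = x := pvGetD_drop hi hd
    have hd' : a.drop (i + 1).toNat = xs := pvDrop_succ hi hd
    by_cases hle : x ≤ m
    · simp only [pvGo, if_pos hle, List.map_cons, hx]
      rw [ih (i + 1) x a (by omega) hd']
    · simp only [pvGo, if_neg hle]
      exact ih (i + 1) m a (by omega) hd' 

-- ===== VERDICT (by name: the statement is the Claim_ definition above) =====
theorem filter_descending_part_spec : Claim_equal_filter_descending_part := by
  intro a _ hpre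
  unfold Spec_filter_descending_part
  match a with
  | [] => exact absurd rfl hpre
  | h :: t =>
    have hd0 : (h :: t).drop (0 : Int).toNat = h :: t := by simp
    have hget0 : PySem.List.pyGetD (h :: t) 0 0 = h := pvGetD_drop le_rfl hd0
    have hd1 : (h :: t).drop (1 : Int).toNat = t := by simp
    -- A side
    have hA : filter_descending_part (h :: t)
        = (h :: (pvGo h 1 t).1, (0 : Int) :: (pvGo h 1 t).2) := by
      unfold filter_descending_part
      rw [hget0, pvLoopA t 1 (h :: t) [h] [0] h (by omega) hd1
        (by simp [PySem.List.pyGetD, PySem.List.pyGet?_neg_one])]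
      simp
    -- B side
    have hB : filter_descending_part_alt (h :: t)
        = (h :: (pvGo h 1 t).1, (0 : Int) :: (pvGo h 1 t).2) := by
      unfold filter_descending_part_alt
      rw [hget0, pvPmFold]
      simp only [List.nil_append]
      have hpm : pvPm h (h :: t) = h :: pvPm h t := by simp [pvPm]
      rw [hpm, PySem.List.enumerate_cons]
      have hpmget : PySem.List.pyGetD (h :: pvPm h t) 0 0 = h :=
        pvGetD_drop le_rfl
          (by simp : List.drop (Int.toNat 0) (h :: pvPm h t) = h :: pvPm h t)
      simp only [List.filter_cons, hpmget, beq_self_eq_true, if_pos, List.map_cons,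
        zero_add]
      rw [pvLoopB t 1 h (h :: pvPm h t) (by omega)
        (by simp : List.drop (Int.toNat 1) (h :: pvPm h t) = pvPm h t)]
      rw [hget0, pvMapIdx t 1 h (h :: t) (by omega) hd1]
    rw [hA, hB]
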